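-- pv_equiv track=rewrite | github.com/student-jjh/2024daily | 2024_02_08/backJoon/3986.py | good_word
-- ===== SOURCE A (Python) =====
-- def good_word(words):
--     stack = []
--     for word in words:
--         if stack == [] or stack[-1] != word:
--             stack.append(word)
--         else:
--             stack.pop()
--     if stack != []:
--         return False
--     return True
-- ===== SOURCE B (Python) =====
-- def good_word(words):
--     s = list(words)
--     while True:
--         for i in range(len(s) - 1):
--             if s[i] == s[i + 1]:
--                 del s[i:i + 2]
--                 break
--         else:
--             return len(s) == 0
-- ===== Notes on version B (the rewrite author's own statement) =====
-- stated objective: alternative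
-- what changed: Replaces the single-pass stack cancellation with repeated full scans that delete the first adjacent equal pair until none remains (returns whether the list emptied); equivalence rests on confluence of adjacent-pair removal.
import Mathlib
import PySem

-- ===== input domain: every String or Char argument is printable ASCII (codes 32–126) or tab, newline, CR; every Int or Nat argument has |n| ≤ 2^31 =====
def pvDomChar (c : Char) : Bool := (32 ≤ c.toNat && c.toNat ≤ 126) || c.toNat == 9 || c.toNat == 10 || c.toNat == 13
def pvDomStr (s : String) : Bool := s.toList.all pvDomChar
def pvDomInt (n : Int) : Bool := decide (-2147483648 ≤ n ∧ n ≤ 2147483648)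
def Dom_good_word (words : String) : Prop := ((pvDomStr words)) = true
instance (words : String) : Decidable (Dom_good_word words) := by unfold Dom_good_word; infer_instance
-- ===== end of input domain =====

-- B replaces A's one-pass stack cancellation by repeatedly deleting the first adjacent
-- equal pair until none remains (objective: alternative decomposition, same result).

-- ===== PORT A =====
-- the loop body: push when stack empty or top differs, else pop (stack kept top-first)
def gwStep (st : List Char) (w : Char) : List Char :=
  if st = [] ∨ st.head? ≠ some w then w :: st else st.tail

def good_word (words : String) : Bool :=
  let stack := words.toList.foldl gwStep []
  if stack ≠ [] then false else true

-- ===== PORT B =====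
-- one scan of Source B's inner for-loop: first adjacent equal pair removed, or none
def gwDelPair : List Char → Option (List Char)
  | a :: b :: t => if a = b then some t else (gwDelPair (b :: t)).map (a :: ·)
  | _ => none

theorem gwDelPair_length : ∀ (l l' : List Char), gwDelPair l = some l' → l'.length + 2 = l.length := by
  intro l
  induction l with
  | nil => intro l' h; simp [gwDelPair] at h
  | cons a t ih =>
    intro l' h
    cases t with
    | nil => simp [gwDelPair] at h
    | cons b t2 =>
      simp only [gwDelPair] at h
      split at h
      · cases h; simp
      · simp only [Option.map_eq_some_iff] at h
        obtain ⟨m, hm, rfl⟩ := h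
        have := ih m hm
        simp at this ⊢
        omega

-- Source B's outer while-loop: rescan until a full pass deletes nothing
def gwCollapse (l : List Char) : List Char :=
  match h : gwDelPair l with
  | some l' => gwCollapse l'
  | none => l
termination_by l.length
decreasing_by have := gwDelPair_length l l' h; omega

def good_word_alt (words : String) : Bool :=
  gwCollapse words.toList = ([] : List Char)

-- ===== PRECONDITION & SPEC =====
def Spec_good_word (words : String) (out : Bool) : Prop := out = good_word_alt words
instance (words : String) (out : Bool) : Decidable (Spec_good_word words out) := by unfold Spec_good_word; infer_instance

-- ===== CLAIM (what is proved, stated in full; the proofs are below) =====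
def Claim_equal_good_word : Prop := ∀ (words : String), Dom_good_word words → Spec_good_word words (good_word words)

-- ===== LEMMAS AND PROOFS =====

-- removing one adjacent equal pair does not change the stack fold, provided the stack is reduced
theorem gwStep_pair (st : List Char) (hred : st.IsChain (· ≠ ·)) (c : Char) :
    gwStep (gwStep st c) c = st := by
  cases st with
  | nil => simp [gwStep]
  | cons a t =>
    by_cases hac : a = c
    · subst hac
      simp only [gwStep, List.head?_cons, ne_eq, Option.some.injEq, not_true_eq_false, or_false,
        reduceCtorEq, false_or, List.tail_cons]
      cases t with
      | nil => simp
      | cons b t2 =>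
        have hab : a ≠ b := (List.isChain_cons_cons.mp hred).1
        simp [Ne.symm hab]
    · simp [gwStep, hac]

-- the stack stays reduced (no two adjacent equal elements)
theorem gwStep_red (st : List Char) (hred : st.IsChain (· ≠ ·)) (c : Char) :
    (gwStep st c).IsChain (· ≠ ·) := by
  cases st with
  | nil => simp only [gwStep]; simp
  | cons a t =>
    by_cases hac : a = c
    · subst hac
      simp only [gwStep, List.head?_cons, ne_eq, Option.some.injEq, not_true_eq_false, or_false,
        reduceCtorEq, false_or, List.tail_cons]
      exact (List.isChain_cons.mp hred).2
    · simp only [gwStep, List.head?_cons, ne_eq, reduceCtorEq, false_or]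
      rw [if_pos (by simpa using hac)]
      exact List.isChain_cons_cons.mpr ⟨fun hca => hac hca.symm, hred⟩

theorem gwFold_delPair (l : List Char) : ∀ (l' st : List Char), st.IsChain (· ≠ ·) →
    gwDelPair l = some l' → l.foldl gwStep st = l'.foldl gwStep st := by
  induction l with
  | nil => intro l' st _ h; simp [gwDelPair] at h
  | cons a t ih =>
    intro l' st hred h
    cases t with
    | nil => simp [gwDelPair] at h
    | cons b t2 =>
      simp only [gwDelPair] at h
      split at h
      · rename_i hab
        cases h
        subst hab
        simp only [List.foldl_cons]
        rw [gwStep_pair st hred a]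
      · simp only [Option.map_eq_some_iff] at h
        obtain ⟨m, hm, rfl⟩ := h
        simp only [List.foldl_cons]
        exact ih m (gwStep st a) (gwStep_red st hred a) hm

-- on a list with no adjacent equal pair the fold never pops: it is reversal onto the stack
theorem gwFold_noPair (l : List Char) : ∀ (x : Char) (st : List Char), (x :: l).IsChain (· ≠ ·) →
    l.foldl gwStep (x :: st) = l.reverse ++ x :: st := by
  induction l with
  | nil => intro x st _; simp
  | cons a t ih =>
    intro x st h
    have hxa : x ≠ a := (List.isChain_cons_cons.mp h).1
    have h2 : (a :: t).IsChain (· ≠ ·) := (List.isChain_cons_cons.mp h).2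
    simp only [List.foldl_cons, gwStep, List.head?_cons, ne_eq, Option.some.injEq, reduceCtorEq,
      false_or]
    rw [if_pos (by simpa using hxa)]
    rw [ih a (x :: st) h2]
    simp

theorem gwDelPair_none (l : List Char) (h : gwDelPair l = none) : l.IsChain (· ≠ ·) := by
  induction l with
  | nil => exact List.isChain_nil
  | cons a t ih =>
    cases t with
    | nil => exact List.isChain_singleton a
    | cons b t2 =>
      simp only [gwDelPair] at h
      split at h
      · exact absurd h (by simp)
      · rename_i hab
        simp only [Option.map_eq_none_iff] at h
        exact List.isChain_cons_cons.mpr ⟨hab, ih h⟩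

theorem gwCollapse_fold_aux : ∀ (n : Nat) (l : List Char), l.length ≤ n →
    (gwCollapse l).foldl gwStep [] = l.foldl gwStep [] ∧ gwDelPair (gwCollapse l) = none := by
  intro n
  induction n with
  | zero =>
    intro l hl
    have : l = [] := List.length_eq_zero_iff.mp (Nat.le_zero.mp hl)
    subst this
    rw [gwCollapse]
    exact ⟨rfl, rfl⟩
  | succ n ih =>
    intro l hl
    rw [gwCollapse]
    split
    · rename_i l' h
      have hlen := gwDelPair_length l l' h
      have := ih l' (by omega)
      refine ⟨?_, this.2⟩
      rw [this.1, gwFold_delPair l l' [] List.isChain_nil h]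
    · rename_i h
      exact ⟨rfl, h⟩

theorem gwCollapse_fold (l : List Char) :
    (gwCollapse l).foldl gwStep [] = l.foldl gwStep [] ∧ gwDelPair (gwCollapse l) = none :=
  gwCollapse_fold_aux l.length l (le_refl _)

-- ===== VERDICT (by name: the statement is the Claim_ definition above) =====
theorem good_word_spec : Claim_equal_good_word := by
  intro words _
  unfold Spec_good_word good_word good_word_alt
  obtain ⟨hfold, hnone⟩ := gwCollapse_fold words.toList
  cases hc : gwCollapse words.toList with
  | nil =>
    rw [hc] at hfold
    simp [← hfold]
  | cons a t =>
    rw [hc] at hfold hnone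
    have hred : (a :: t).IsChain (· ≠ ·) := gwDelPair_none _ hnone
    have : (a :: t).foldl gwStep ([] : List Char) = t.reverse ++ [a] := by
      simp only [List.foldl_cons, gwStep]
      rw [if_pos (by simp)]
      simpa using gwFold_noPair t a [] hred
    rw [this] at hfold
    have hne : words.toList.foldl gwStep [] ≠ [] := by
      rw [← hfold]; simp
    simp [hne]
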